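-- pv_equiv track=rewrite | github.com/UberM1/bingo | src/bingo.py | vacios_segui2
-- ===== SOURCE A (Python) =====
-- def vacios_segui2(mi_carton):
--     count = 0
--     for fila in mi_carton:
--         count = 0
--         for celda in fila:
--             if(celda == 0):
--                 count+=1
--             if(celda != 0):
--                 count = 0
--             if(count > 2):
--                 return False
--     if count > 2:
--         return False
--     else:
--         return True
-- ===== SOURCE B (Python) =====
-- def vacios_segui2(mi_carton):
--     for fila in mi_carton:
--         if any(a == 0 and b == 0 and c == 0 for a, b, c in zip(fila, fila[1:], fila[2:])):
--             return False
--     return True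
-- ===== Notes on version B (the rewrite author's own statement) =====
-- stated objective: idiomatic
-- what changed: Replaced the stateful counter-with-reset scan (with an early return inside nested loops and a redundant final check) by a fixed-width sliding-window test: a row fails iff some triple of consecutive cells is all zeros.
import Mathlib
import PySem

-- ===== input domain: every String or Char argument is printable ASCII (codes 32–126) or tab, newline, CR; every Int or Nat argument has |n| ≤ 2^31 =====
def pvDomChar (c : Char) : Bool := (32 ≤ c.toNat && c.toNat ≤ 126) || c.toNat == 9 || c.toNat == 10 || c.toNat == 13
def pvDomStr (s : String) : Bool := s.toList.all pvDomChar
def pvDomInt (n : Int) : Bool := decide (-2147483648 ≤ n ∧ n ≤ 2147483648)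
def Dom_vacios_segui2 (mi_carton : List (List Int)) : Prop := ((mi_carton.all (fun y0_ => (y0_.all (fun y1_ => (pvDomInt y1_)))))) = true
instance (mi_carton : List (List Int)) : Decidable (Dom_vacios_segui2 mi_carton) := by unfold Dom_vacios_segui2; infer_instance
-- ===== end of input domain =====

-- B replaces A's stateful counter-with-reset scan by a sliding-window "three consecutive zeros" test (idiomatic decomposition, same cost).

-- ===== PORT A =====
-- inner 'for celda in fila' loop with running count; 'none' = early 'return False'
def pvRowScan (fila : List Int) (count : Int) : Option Int :=
  match fila with
  | [] => some count
  | celda :: rest =>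
    let count := if celda == 0 then count + 1 else count
    let count := if celda != 0 then 0 else count
    if count > 2 then none else pvRowScan rest count

-- outer 'for fila in mi_carton' loop; after the loop the trailing 'if count > 2' check
def pvCartonLoop (rows : List (List Int)) (count : Int) : Bool :=
  match rows with
  | [] => if count > 2 then false else true
  | fila :: rest =>
    match pvRowScan fila 0 with
    | none => false
    | some c => pvCartonLoop rest c

def vacios_segui2 (mi_carton : List (List Int)) : Bool :=
  pvCartonLoop mi_carton 0

-- ===== PORT B =====
-- 'any(a==0 and b==0 and c==0 for a,b,c in zip(fila, fila[1:], fila[2:]))'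
def pvHasTriple : List Int → Bool
  | a :: b :: c :: rest => (a == 0 && b == 0 && c == 0) || pvHasTriple (b :: c :: rest)
  | _ => false

def vacios_segui2_alt (mi_carton : List (List Int)) : Bool :=
  mi_carton.all (fun fila => !pvHasTriple fila)

-- ===== PRECONDITION & SPEC =====
def Spec_vacios_segui2 (mi_carton : List (List Int)) (out : Bool) : Prop := out = vacios_segui2_alt mi_carton
instance (mi_carton : List (List Int)) (out : Bool) : Decidable (Spec_vacios_segui2 mi_carton out) := by unfold Spec_vacios_segui2; infer_instance

-- ===== CLAIM (what is proved, stated in full; the proofs are below) =====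
def Claim_equal_vacios_segui2 : Prop := ∀ (mi_carton : List (List Int)), Dom_vacios_segui2 mi_carton → Spec_vacios_segui2 mi_carton (vacios_segui2 mi_carton)

-- ===== LEMMAS AND PROOFS =====

-- 'the first n cells exist and are all zero'
def pvZPre : Nat → List Int → Bool
  | 0, _ => true
  | _ + 1, [] => false
  | n + 1, c :: r => c == 0 && pvZPre n r

theorem pvZPre_zero (f : List Int) : pvZPre 0 f = true := rfl
theorem pvZPre_one_cons (a : Int) (t : List Int) : pvZPre 1 (a :: t) = (a == 0 && pvZPre 0 t) := rfl
theorem pvZPre_two_cons (a : Int) (t : List Int) : pvZPre 2 (a :: t) = (a == 0 && pvZPre 1 t) := rfl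
theorem pvZPre_three_cons (a : Int) (t : List Int) : pvZPre 3 (a :: t) = (a == 0 && pvZPre 2 t) := rfl
theorem pvZPre_one_nil : pvZPre 1 ([] : List Int) = false := rfl
theorem pvZPre_two_nil : pvZPre 2 ([] : List Int) = false := rfl
theorem pvZPre_three_nil : pvZPre 3 ([] : List Int) = false := rfl

theorem pvHasTriple_nil : pvHasTriple [] = false := rfl
theorem pvHasTriple_one (a : Int) : pvHasTriple [a] = false := rfl
theorem pvHasTriple_two (a b : Int) : pvHasTriple [a, b] = false := rfl
theorem pvHasTriple_cons3 (a b c : Int) (t : List Int) :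
    pvHasTriple (a :: b :: c :: t) = ((a == 0 && b == 0 && c == 0) || pvHasTriple (b :: c :: t)) := rfl

theorem pvZPre_two_imp_one (r : List Int) (h : pvZPre 2 r = true) : pvZPre 1 r = true := by
  match r with
  | [] => simp [pvZPre_two_nil] at h
  | a :: t => simp [pvZPre_two_cons, pvZPre_one_cons, pvZPre_zero] at h ⊢; exact h.1

theorem pvZPre_three_hasTriple (f : List Int) (h : pvZPre 3 f = true) : pvHasTriple f = true := by
  match f with
  | [] => simp [pvZPre_three_nil] at h
  | [a] => simp [pvZPre_three_cons, pvZPre_two_nil] at h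
  | [a, b] => simp [pvZPre_three_cons, pvZPre_two_cons, pvZPre_one_nil] at h
  | a :: b :: c :: t =>
    simp [pvZPre_three_cons, pvZPre_two_cons, pvZPre_one_cons, pvZPre_zero] at h
    simp [pvHasTriple_cons3, h.1, h.2.1, h.2.2]

theorem pvHasTriple_zero_cons (rest : List Int) :
    pvHasTriple (0 :: rest) = (pvZPre 2 rest || pvHasTriple rest) := by
  match rest with
  | [] => simp [pvHasTriple_one, pvHasTriple_nil, pvZPre_two_nil]
  | [a] => simp [pvHasTriple_two, pvHasTriple_one, pvZPre_two_cons, pvZPre_one_nil]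
  | a :: b :: t =>
    simp [pvHasTriple_cons3, pvZPre_two_cons, pvZPre_one_cons, pvZPre_zero]

theorem pvHasTriple_nz_cons (c : Int) (rest : List Int) (hc : ¬ c = 0) :
    pvHasTriple (c :: rest) = pvHasTriple rest := by
  match rest with
  | [] => simp [pvHasTriple_one, pvHasTriple_nil]
  | [a] => simp [pvHasTriple_two, pvHasTriple_one]
  | a :: b :: t => simp [pvHasTriple_cons3, hc]

theorem pvRowScan_zero_cons (r : List Int) (k : Int) :
    pvRowScan (0 :: r) k = if k + 1 > 2 then none else pvRowScan r (k + 1) := by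
  simp [pvRowScan]

theorem pvRowScan_nz_cons (c : Int) (r : List Int) (k : Int) (hc : ¬ c = 0) :
    pvRowScan (c :: r) k = pvRowScan r 0 := by
  simp [pvRowScan, hc]

theorem pvRowScan_none_iff (f : List Int) (k : Int) (hk : k = 0 ∨ k = 1 ∨ k = 2) :
    pvRowScan f k = none ↔ (pvZPre (3 - k).toNat f || pvHasTriple f) = true := by
  induction f generalizing k with
  | nil =>
    rcases hk with rfl | rfl | rfl <;>
      simp [pvRowScan, pvHasTriple_nil, pvZPre_one_nil, pvZPre_two_nil, pvZPre_three_nil]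
  | cons c rest ih =>
    by_cases hc : c = 0
    · subst hc
      rcases hk with rfl | rfl | rfl
      · rw [pvRowScan_zero_cons, if_neg (by decide), show (0 : Int) + 1 = 1 from by norm_num]
        rw [ih 1 (by norm_num)]
        simp only [show ((3 : Int) - 1).toNat = 2 from by decide,
          show ((3 : Int) - 0).toNat = 3 from by decide, pvZPre_three_cons, pvHasTriple_zero_cons]
        simp only [beq_self_eq_true, Bool.true_and, Bool.or_eq_true]
        tauto
      · rw [pvRowScan_zero_cons, if_neg (by decide), show (1 : Int) + 1 = 2 from by norm_num]
        rw [ih 2 (by norm_num)]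
        have mono := pvZPre_two_imp_one rest
        simp only [show ((3 : Int) - 2).toNat = 1 from by decide,
          show ((3 : Int) - 1).toNat = 2 from by decide, pvZPre_two_cons, pvHasTriple_zero_cons]
        simp only [beq_self_eq_true, Bool.true_and, Bool.or_eq_true]
        tauto
      · rw [pvRowScan_zero_cons, if_pos (by decide)]
        simp only [show ((3 : Int) - 2).toNat = 1 from by decide, pvZPre_one_cons, pvZPre_zero]
        simp
    · rw [pvRowScan_nz_cons c rest k hc]
      rw [ih 0 (by norm_num)]
      simp only [show ((3 : Int) - 0).toNat = 3 from by decide]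
      rw [pvHasTriple_nz_cons c rest hc]
      have himp := pvZPre_three_hasTriple rest
      have hzfalse : pvZPre (3 - k).toNat (c :: rest) = false := by
        rcases hk with rfl | rfl | rfl <;>
          simp only [show ((3 : Int) - 0).toNat = 3 from by decide,
            show ((3 : Int) - 1).toNat = 2 from by decide,
            show ((3 : Int) - 2).toNat = 1 from by decide,
            pvZPre_three_cons, pvZPre_two_cons, pvZPre_one_cons] <;> simp [hc]
      rw [hzfalse]
      simp only [Bool.false_or]
      constructor
      · intro h
        simp only [Bool.or_eq_true] at h
        rcases h with h | h
        · exact himp h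
        · exact h
      · intro h
        simp only [Bool.or_eq_true]
        exact Or.inr h

theorem pvRowScan_some_le (f : List Int) (k c : Int) (hk : k ≤ 2)
    (h : pvRowScan f k = some c) : c ≤ 2 := by
  induction f generalizing k with
  | nil => simp [pvRowScan] at h; omega
  | cons x rest ih =>
    simp only [pvRowScan] at h
    split_ifs at h
    all_goals first
      | (exact absurd h (by simp))
      | (exact ih _ (by omega) h)

theorem pvCartonLoop_eq (rows : List (List Int)) (c : Int) (hc : c ≤ 2) :
    pvCartonLoop rows c = rows.all (fun fila => !pvHasTriple fila) := by
  induction rows generalizing c with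
  | nil => simp [pvCartonLoop]; omega
  | cons f rest ih =>
    simp only [pvCartonLoop, List.all_cons]
    rcases hscan : pvRowScan f 0 with _ | c'
    · have hn := (pvRowScan_none_iff f 0 (by norm_num)).mp hscan
      have h3 : ((3 : Int) - 0).toNat = 3 := by decide
      rw [h3] at hn
      have ht : pvHasTriple f = true := by
        simp at hn
        rcases hn with h | h
        · exact pvZPre_three_hasTriple f h
        · exact h
      simp [ht]
    · have hle : c' ≤ 2 := pvRowScan_some_le f 0 c' (by norm_num) hscan
      have hnt : pvHasTriple f = false := by
        by_contra hh
        have hn : pvRowScan f 0 = none := by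
          rw [pvRowScan_none_iff f 0 (by norm_num)]
          simp at hh ⊢
          tauto
        simp [hn] at hscan
      simp [hnt, ih c' hle]

-- ===== VERDICT (by name: the statement is the Claim_ definition above) =====
theorem vacios_segui2_spec : Claim_equal_vacios_segui2 := by
  intro m _
  show vacios_segui2 m = vacios_segui2_alt m
  exact pvCartonLoop_eq m 0 (by norm_num)
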